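-- pv_equiv track=rewrite | github.com/olgs0011/praktika2025 | Top_100_03.py | get_top_and_related_articles
-- ===== SOURCE A (Python) =====
-- import heapq
-- from collections import defaultdict
--
-- TOP_N = 100
--
-- def get_top_and_related_articles(citation_network, top_n=TOP_N):
--     """Возвращает топ-N статей и все связанные статьи"""
--     citation_counts = defaultdict(int)
--     for paper, cited in citation_network.items():
--         citation_counts[paper] += len(cited)
--         for cited_paper in cited:
--             citation_counts[cited_paper] += 1
--
--     top_articles = heapq.nlargest(top_n, citation_counts.items(), key=lambda x: x[1])
--     top_ids = {paper_id for paper_id, _ in top_articles}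
--
--     related_articles = set()
--     for paper_id in top_ids:
--         related_articles.update(citation_network.get(paper_id, set()))
--         for citing_paper, cited in citation_network.items():
--             if paper_id in cited:
--                 related_articles.add(citing_paper)
--
--     return top_ids.union(related_articles), citation_counts
-- ===== SOURCE B (Python) =====
-- TOP_N = 100
--
-- def get_top_and_related_articles(citation_network, top_n=TOP_N):
--     """Топ-N и связанные статьи: плоский список событий -> подсчёт; обратный индекс;
--     один общий пул, дедуплицируемый в самом конце."""
--     # stage 1: flatten the network into (node, increment) events, then tally them
--     events = []
--     for paper, cited in citation_network.items():
--         events += [(paper, len(cited))] + [(c, 1) for c in cited]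
--     citation_counts = {}
--     for node, inc in events:
--         citation_counts[node] = citation_counts.get(node, 0) + inc
--
--     # stage 2: rank by count (stable descending sort + slice instead of heapq.nlargest)
--     ranked = sorted(citation_counts.items(), key=lambda item: item[1], reverse=True)
--     top_list = [paper_id for paper_id, _ in ranked[:max(top_n, 0)]]
--
--     # stage 3: reverse index cited -> citing papers, built in one pass over the network
--     reverse_index = {}
--     for citing_paper, cited in citation_network.items():
--         for c in dict.fromkeys(cited):
--             reverse_index.setdefault(c, []).append(citing_paper)
--
--     # stage 4: one flat pool (top ids, their cited lists, their citers), set() at the end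
--     pool = list(top_list)
--     for t in top_list:
--         pool += citation_network.get(t, [])
--         pool += reverse_index.get(t, [])
--     return set(pool), citation_counts
-- ===== Notes on version B (the rewrite author's own statement) =====
-- stated objective: faster
-- what changed: B is a staged pipeline instead of A's nested loops: it flattens the network into (node, increment) events and tallies them, ranks by an explicit descending sort + slice instead of heapq.nlargest, builds a reverse index (cited -> citing) in one pass so the per-top-id rescan of the whole network disappears, and collects one flat pool of top ids and their neighbours that is deduplicated by a single set() at the end instead of incremental set updates.
import Mathlib
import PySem

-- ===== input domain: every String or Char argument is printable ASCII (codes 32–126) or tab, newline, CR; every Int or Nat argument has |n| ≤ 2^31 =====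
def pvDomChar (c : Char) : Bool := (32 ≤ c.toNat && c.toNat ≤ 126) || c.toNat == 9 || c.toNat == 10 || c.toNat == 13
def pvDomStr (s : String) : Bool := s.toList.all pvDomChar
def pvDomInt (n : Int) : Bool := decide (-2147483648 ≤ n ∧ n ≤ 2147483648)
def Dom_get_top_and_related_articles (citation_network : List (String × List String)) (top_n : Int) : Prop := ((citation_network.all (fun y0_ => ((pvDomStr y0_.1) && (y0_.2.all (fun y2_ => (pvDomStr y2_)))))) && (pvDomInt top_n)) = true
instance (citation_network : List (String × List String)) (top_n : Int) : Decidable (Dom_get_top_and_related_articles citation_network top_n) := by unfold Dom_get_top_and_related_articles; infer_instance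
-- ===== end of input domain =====

-- B is a staged pipeline: flatten to (node, increment) events then tally; sort+slice for
-- the top-N; a reverse index (cited → citing) built in one pass replaces A's per-top-id
-- scan of the whole network; one flat pool dedup'd at the end. Objective: faster.

-- ===== PORT A =====
-- Literal port of A: defaultdict counting loop, heapq.nlargest (= sorted desc, stable,
-- take max(n,0)), then for each top id an update with its cited list and a full scan of
-- the network for papers citing it.
def get_top_and_related_articles (citation_network : List (String × List String)) (top_n : Int) : List String × (List (String × Int)) :=
  let citation_counts : PySem.Dict String Int :=
    citation_network.foldl (fun d pc =>
      let d1 := PySem.Dict.modify d pc.1 0 (· + (pc.2.length : Int))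
      pc.2.foldl (fun d c => PySem.Dict.modify d c 0 (· + 1)) d1) PySem.Dict.empty
  let top_articles := (PySem.List.sorted citation_counts.items (fun x => x.2) true).take top_n.toNat
  let top_ids : PySem.Set String := PySem.Set.ofList (top_articles.map Prod.fst)
  let related_articles : PySem.Set String :=
    top_ids.foldl (fun r t =>
      let r1 := PySem.Set.update r ((PySem.Dict.mk citation_network).getD t [])
      citation_network.foldl (fun r pc => if pc.2.contains t then PySem.Set.add r pc.1 else r) r1)
      PySem.Set.empty
  (PySem.Set.union top_ids related_articles, (citation_counts).items)

-- ===== PORT B =====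
-- Literal port of B (Source B): events list built by '+=' (foldl append), tally loop over
-- events, sorted-descending slice '[:max(top_n,0)]', reverse index via
-- setdefault(c,[]).append(p) (= modify with ++ [p]), flat pool, set() at the end.
def get_top_and_related_articles_alt (citation_network : List (String × List String)) (top_n : Int) : List String × (List (String × Int)) :=
  let events : List (String × Int) :=
    citation_network.foldl (fun es pc =>
      es ++ ([(pc.1, (pc.2.length : Int))] ++ pc.2.map (fun c => (c, (1 : Int))))) []
  let citation_counts : PySem.Dict String Int :=
    events.foldl (fun d e => PySem.Dict.insert d e.1 (PySem.Dict.getD d e.1 0 + e.2)) PySem.Dict.empty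
  let ranked := PySem.List.sorted citation_counts.items (fun item => item.2) true
  let top_list := (ranked.take (max top_n 0).toNat).map Prod.fst
  let reverse_index : PySem.Dict String (List String) :=
    citation_network.foldl (fun d pc =>
      (PySem.List.dedup pc.2).foldl (fun d c => PySem.Dict.modify d c [] (· ++ [pc.1])) d)
      PySem.Dict.empty
  let pool :=
    top_list.foldl (fun pool t =>
      (pool ++ (PySem.Dict.mk citation_network).getD t []) ++ reverse_index.getD t []) top_list
  (PySem.Set.ofList pool, (citation_counts).items)

-- ===== PRECONDITION & SPEC =====
def Spec_get_top_and_related_articles (citation_network : List (String × List String)) (top_n : Int) (out : List String × (List (String × Int))) : Prop := out = get_top_and_related_articles_alt citation_network top_n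
instance (citation_network : List (String × List String)) (top_n : Int) (out : List String × (List (String × Int))) : Decidable (Spec_get_top_and_related_articles citation_network top_n out) := by unfold Spec_get_top_and_related_articles; infer_instance

-- ===== CLAIM =====
def Claim_equal_get_top_and_related_articles : Prop := ∀ (citation_network : List (String × List String)) (top_n : Int), Dom_get_top_and_related_articles citation_network top_n → Spec_get_top_and_related_articles citation_network top_n (get_top_and_related_articles citation_network top_n)

-- ===== LEMMAS AND PROOFS =====

-- B's staged tally over the flattened event list is A's nested defaultdict loop
-- (Dict.modify k 0 (·+v) is definitionally insert k (getD k 0 + v)).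
theorem pv_counts_eq (l : List (String × List String)) :
    (l.foldl (fun es pc =>
        es ++ ([(pc.1, (pc.2.length : Int))] ++ pc.2.map (fun c => (c, (1 : Int))))) []).foldl
      (fun d e => PySem.Dict.insert d e.1 (PySem.Dict.getD d e.1 0 + e.2)) PySem.Dict.empty
    = l.foldl (fun d pc =>
        let d1 := PySem.Dict.modify d pc.1 0 (· + (pc.2.length : Int))
        pc.2.foldl (fun d c => PySem.Dict.modify d c 0 (· + 1)) d1) PySem.Dict.empty := by
  rw [PySem.List.foldl_append_eq_flatMap, List.nil_append, List.foldl_flatMap]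
  refine PySem.List.foldl_congr_mem _ _ _ _ (fun d pc _ => ?_)
  simp only [List.singleton_append, List.foldl_cons, List.foldl_map]
  rfl

-- the counting loop keeps the dict's keys distinct
theorem pv_counts_keys_nodup (l : List (String × List String)) :
    ∀ d : PySem.Dict String Int, d.keys.Nodup →
      (l.foldl (fun d pc =>
        let d1 := PySem.Dict.modify d pc.1 0 (· + (pc.2.length : Int))
        pc.2.foldl (fun d c => PySem.Dict.modify d c 0 (· + 1)) d1) d).keys.Nodup := by
  induction l with
  | nil => intro d h; exact h
  | cons pc l ih =>
      intro d h
      refine ih _ (PySem.Dict.nodup_keys_foldl_modify_key pc.2 id 0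
        (fun _ _ => (· + 1)) _ ?_)
      rw [PySem.Dict.keys_modify]
      exact PySem.Dict.nodup_keys_insert _ _ _ h

-- A's inner scan "for (citing, cited) in network: if t in cited: add citing" is an
-- update with the citing papers of t, in network order.
theorem pv_scan_eq_update (t : String) (l : List (String × List String)) :
    ∀ r : PySem.Set String,
      l.foldl (fun r pc => if pc.2.contains t then PySem.Set.add r pc.1 else r) r
      = PySem.Set.update r ((l.filter (fun pc => pc.2.contains t)).map Prod.fst) := by
  induction l with
  | nil => intro r; rfl
  | cons pc l ih =>
      intro r
      by_cases h : pc.2.contains t = true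
      · simp only [List.foldl_cons, List.filter_cons, h]
        rw [ih]; rfl
      · simp only [List.foldl_cons, List.filter_cons, h]
        rw [ih]; rfl

-- one cited list's contribution to the reverse index at key t
theorem pv_ri_inner (p t : String) (cs : List String) :
    ∀ d : PySem.Dict String (List String),
      PySem.Dict.getD (cs.foldl (fun d c => PySem.Dict.modify d c [] (· ++ [p])) d) t []
      = PySem.Dict.getD d t [] ++ List.replicate (cs.count t) p := by
  induction cs with
  | nil => intro d; simp
  | cons c cs ih =>
      intro d
      simp only [List.foldl_cons]
      rw [ih]
      by_cases h : t = c
      · subst h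
        rw [PySem.Dict.getD_modify_self]
        simp only [List.count_cons_self, List.append_assoc, List.singleton_append,
          ← List.replicate_succ]
      · rw [PySem.Dict.getD_modify_of_ne]
        · simp [Ne.symm h]
        · exact h

theorem pv_count_dedup (t : String) (cs : List String) :
    (PySem.List.dedup cs).count t = if cs.contains t then 1 else 0 := by
  by_cases h : t ∈ cs
  · rw [List.count_eq_one_of_mem (PySem.List.nodup_dedup cs) ((PySem.List.mem_dedup cs t).2 h)]
    simp [h]
  · rw [List.count_eq_zero.2 (fun hm => h ((PySem.List.mem_dedup cs t).1 hm))]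
    simp [h]

-- the reverse index at key t holds exactly the citing papers of t, in network order
theorem pv_ri_getD (t : String) (l : List (String × List String)) :
    ∀ d : PySem.Dict String (List String),
      PySem.Dict.getD (l.foldl (fun d pc =>
          (PySem.List.dedup pc.2).foldl (fun d c => PySem.Dict.modify d c [] (· ++ [pc.1])) d) d) t []
      = PySem.Dict.getD d t [] ++ ((l.filter (fun pc => pc.2.contains t)).map Prod.fst) := by
  induction l with
  | nil => intro d; simp
  | cons pc l ih =>
      intro d
      simp only [List.foldl_cons]
      rw [ih, pv_ri_inner, pv_count_dedup]
      by_cases h : t ∈ pc.2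
      · simp [h]
      · simp [h]

-- adding an already-collected batch commutes out of an update
theorem pv_update_update (l : List String) :
    ∀ (t s : PySem.Set String),
      PySem.Set.update s (PySem.Set.update t l) = PySem.Set.update (PySem.Set.update s t) l := by
  induction l with
  | nil => intro t s; rfl
  | cons x l ih =>
      intro t s
      rw [PySem.Set.update_cons, PySem.Set.update_cons, ih]
      congr 1
      by_cases h : x ∈ t
      · rw [PySem.Set.add_of_mem h, PySem.Set.add_of_mem ((PySem.Set.mem_update _ _ _).2 (Or.inr h))]
      · rw [PySem.Set.add_of_not_mem h, PySem.Set.update_append]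
        rfl

-- pushing a seed set under A's related-articles loop
theorem pv_update_foldl (a b : String → List String) (l : List String) :
    ∀ (r s : PySem.Set String),
      PySem.Set.update s (l.foldl (fun r t => PySem.Set.update (PySem.Set.update r (a t)) (b t)) r)
      = l.foldl (fun r t => PySem.Set.update (PySem.Set.update r (a t)) (b t)) (PySem.Set.update s r) := by
  induction l with
  | nil => intro r s; rfl
  | cons x l ih =>
      intro r s
      simp only [List.foldl_cons]
      rw [ih, pv_update_update, pv_update_update]

-- B's flat pool, dedup'd, is the same loop of set-updates
theorem pv_ofList_pool (a b : String → List String) (l : List String) :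
    ∀ s : PySem.Set String,
      PySem.Set.update s (l.flatMap (fun t => a t ++ b t))
      = l.foldl (fun r t => PySem.Set.update (PySem.Set.update r (a t)) (b t)) s := by
  induction l with
  | nil => intro s; rfl
  | cons x l ih =>
      intro s
      simp only [List.flatMap_cons, List.foldl_cons]
      rw [PySem.Set.update_append, PySem.Set.update_append, ih]

-- ===== VERDICT =====
theorem get_top_and_related_articles_spec : Claim_equal_get_top_and_related_articles := by
  intro citation_network top_n _
  unfold Spec_get_top_and_related_articles
  unfold get_top_and_related_articles get_top_and_related_articles_alt
  dsimp only
  rw [pv_counts_eq]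
  have htn : (max top_n 0).toNat = top_n.toNat := by omega
  rw [htn]
  set counts := citation_network.foldl (fun d pc =>
      let d1 := PySem.Dict.modify d pc.1 0 (· + (pc.2.length : Int))
      pc.2.foldl (fun d c => PySem.Dict.modify d c 0 (· + 1)) d1) PySem.Dict.empty with hcounts
  set top_list := ((PySem.List.sorted counts.items (fun x => x.2) true).take top_n.toNat).map Prod.fst with htop
  have hnd : top_list.Nodup := by
    have h1 : counts.keys.Nodup := pv_counts_keys_nodup _ _ PySem.Dict.nodup_keys_empty
    have h2 : ((PySem.List.sorted counts.items (fun x => x.2) true).map Prod.fst).Nodup := by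
      have hperm : ((PySem.List.sorted counts.items (fun x => x.2) true).map Prod.fst).Perm
          (counts.items.map Prod.fst) := (PySem.List.sorted_perm ..).map Prod.fst
      exact hperm.nodup_iff.2 h1
    exact ((List.take_sublist _ _).map Prod.fst).nodup h2
  have hofl : PySem.Set.ofList top_list = top_list := PySem.Set.ofList_eq_self_of_nodup _ hnd
  refine congrArg₂ Prod.mk ?_ rfl
  rw [hofl]
  -- A's union is an update; rewrite the scan and the reverse-index lookups, then
  -- both sides are the same fold of set-updates seeded with top_list.
  show PySem.Set.update top_list _ = PySem.Set.ofList _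
  have hA : (top_list.foldl (fun r t =>
        let r1 := PySem.Set.update r ((PySem.Dict.mk citation_network).getD t [])
        citation_network.foldl (fun r pc => if pc.2.contains t then PySem.Set.add r pc.1 else r) r1)
        PySem.Set.empty)
      = top_list.foldl (fun r t => PySem.Set.update
          (PySem.Set.update r ((PySem.Dict.mk citation_network).getD t []))
          ((citation_network.filter (fun pc => pc.2.contains t)).map Prod.fst)) PySem.Set.empty := by
    refine PySem.List.foldl_congr_mem _ _ _ _ (fun r t _ => ?_)
    exact pv_scan_eq_update t citation_network _
  rw [hA, pv_update_foldl]
  have hpool : (top_list.foldl (fun pool t =>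
        (pool ++ (PySem.Dict.mk citation_network).getD t []) ++
          (citation_network.foldl (fun d pc =>
            (PySem.List.dedup pc.2).foldl (fun d c => PySem.Dict.modify d c [] (· ++ [pc.1])) d)
            PySem.Dict.empty).getD t []) top_list)
      = top_list ++ top_list.flatMap (fun t =>
          (PySem.Dict.mk citation_network).getD t [] ++
            ((citation_network.filter (fun pc => pc.2.contains t)).map Prod.fst)) := by
    have := PySem.List.foldl_append_eq_flatMap
      (g := fun t => (PySem.Dict.mk citation_network).getD t [] ++
        ((citation_network.filter (fun pc => pc.2.contains t)).map Prod.fst))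
      (l := top_list) (acc := top_list)
    rw [← this]
    refine PySem.List.foldl_congr_mem _ _ _ _ (fun pool t _ => ?_)
    rw [pv_ri_getD]
    simp [List.append_assoc]
  rw [hpool, PySem.Set.ofList_append, hofl, pv_ofList_pool]
  rfl
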